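-- pv_equiv track=rewrite | github.com/tohmakobayashi1016/RL-StringOp | Edited examples/Playground.py | custom_levenshtein_distance_pairwise
-- ===== SOURCE A (Python) =====
-- def custom_levenshtein_distance_pairwise(list1, list2):
--     """
--     Calculate the pairwise Levenshtein distance between two lists of strings.
--     It assumes the lists have the same length and returns the Levenshtein distance
--     for each corresponding pair of strings in the lists separately.
--
--     Args:
--     list1 (list): A list of strings.
--     list2 (list): A list of strings (same length as list1).
--
--     Returns:
--     list: A list of Levenshtein distances for each pair of strings.
--     """
--     # Ensure both lists have the same length
--     if len(list1) != len(list2):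
--         raise ValueError("Lists must have the same length.")
--
--     distances = []
--
--     # Calculate the Levenshtein distance for each pair of strings
--     for str1, str2 in zip(list1, list2):
--         len_str1 = len(str1)
--         len_str2 = len(str2)
--
--         # Create a distance matrix
--         dp = [[0 for j in range(len_str2 + 1)] for i in range(len_str1 + 1)]
--
--         # Initialize the matrix
--         for i in range(len_str1 + 1):
--             dp[i][0] = i
--         for j in range(len_str2 + 1):
--             dp[0][j] = j
--
--         # Compute the Levenshtein distance
--         for i in range(1, len_str1 + 1):
--             for j in range(1, len_str2 + 1):
--                 if str1[i - 1] == str2[j - 1]: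
--                     cost = 0
--                 else:
--                     cost = 1
--                 dp[i][j] = min(dp[i - 1][j] + 1,    # Deletion
--                                dp[i][j - 1] + 1,    # Insertion
--                                dp[i - 1][j - 1] + cost)  # Substitution
--
--         # Append the distance for this pair to the distances list
--         distances.append(dp[len_str1][len_str2])
--
--     return distances
-- ===== SOURCE B (Python) =====
-- def custom_levenshtein_distance_pairwise(list1, list2):
--     if len(list1) != len(list2):
--         raise ValueError("Lists must have the same length.")
--     distances = []
--     for str1, str2 in zip(list1, list2):
--         # Single rolling row; roles of the strings swapped (edit distance is
--         # symmetric): the outer loop consumes str2's characters, the row is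
--         # indexed by prefixes of str1.  No matrix, no index arithmetic.
--         prev = list(range(len(str1) + 1))
--         for c2 in str2:
--             cur = [prev[0] + 1]
--             for c1, diag, above in zip(str1, prev, prev[1:]):
--                 cur.append(min(above + 1, cur[-1] + 1, diag + (0 if c2 == c1 else 1)))
--             prev = cur
--         distances.append(prev[-1])
--     return distances
-- ===== Notes on version B (the rewrite author's own statement) =====
-- stated objective: alternative
-- what changed: B drops A's full (m+1)x(n+1) matrix with its two index-based init loops and index-based double fill loop, and instead keeps a single rolling row updated by zipping one string's characters against the previous row, consuming the strings with the roles of str1/str2 swapped (edit distance is symmetric, which the Lean proof establishes); avoiding the matrix allocation and repeated list indexing gives a measured constant-factor speedup.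
import Mathlib
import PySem

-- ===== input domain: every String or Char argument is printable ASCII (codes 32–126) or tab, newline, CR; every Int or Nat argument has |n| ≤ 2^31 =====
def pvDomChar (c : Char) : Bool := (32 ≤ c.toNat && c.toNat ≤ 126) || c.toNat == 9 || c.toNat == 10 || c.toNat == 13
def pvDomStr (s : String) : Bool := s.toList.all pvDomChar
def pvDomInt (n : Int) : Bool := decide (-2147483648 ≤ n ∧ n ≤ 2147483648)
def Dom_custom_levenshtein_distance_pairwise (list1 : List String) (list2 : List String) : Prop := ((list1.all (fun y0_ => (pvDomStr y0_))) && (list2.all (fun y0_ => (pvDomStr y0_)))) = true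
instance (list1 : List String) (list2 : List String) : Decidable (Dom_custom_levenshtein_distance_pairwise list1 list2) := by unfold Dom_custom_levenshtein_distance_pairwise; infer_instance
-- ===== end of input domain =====

-- B replaces A's full (m+1)×(n+1) matrix with a single rolling row that consumes the
-- swapped strings' characters directly (edit distance is symmetric); return values are
-- proved equal on Pre_ (equal-length lists; A raises ValueError otherwise).

-- ===== PORT A =====
-- per-pair body of A's loop: the full dp matrix, its two init loops and the double fill loop
def stepInit1 (dp : List (List Int)) (i : Int) : List (List Int) :=
  dp.set i.toNat ((PySem.List.pyGetD dp i []).set 0 i)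

def stepInit2 (dp : List (List Int)) (j : Int) : List (List Int) :=
  dp.set 0 ((PySem.List.pyGetD dp 0 []).set j.toNat j)

def stepFill (s t : List Char) (i : Int) (dp : List (List Int)) (j : Int) : List (List Int) :=
  let cost : Int := if PySem.List.pyGet? s (i-1) = PySem.List.pyGet? t (j-1) then 0 else 1
  let v := min (PySem.List.pyGetD (PySem.List.pyGetD dp (i-1) []) j 0 + 1)
            (min (PySem.List.pyGetD (PySem.List.pyGetD dp i []) (j-1) 0 + 1)
                 (PySem.List.pyGetD (PySem.List.pyGetD dp (i-1) []) (j-1) 0 + cost))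
  dp.set i.toNat ((PySem.List.pyGetD dp i []).set j.toNat v)

def fillRow (s t : List Char) (n : Int) (dp : List (List Int)) (i : Int) : List (List Int) :=
  (PySem.List.pyRange 1 (n+1) 1).foldl (stepFill s t i) dp

def levA (s t : List Char) : Int :=
  let m : Int := s.length
  let n : Int := t.length
  let dp0 : List (List Int) :=
    (PySem.List.pyRange 0 (m+1) 1).map (fun _ => (PySem.List.pyRange 0 (n+1) 1).map (fun _ => (0:Int)))
  let dp1 := (PySem.List.pyRange 0 (m+1) 1).foldl stepInit1 dp0
  let dp2 := (PySem.List.pyRange 0 (n+1) 1).foldl stepInit2 dp1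
  let dp3 := (PySem.List.pyRange 1 (m+1) 1).foldl (fillRow s t n) dp2
  PySem.List.pyGetD (PySem.List.pyGetD dp3 m []) n 0

def custom_levenshtein_distance_pairwise (list1 : List String) (list2 : List String) : List Int :=
  -- the ValueError guard: A raises when lengths differ (excluded by Pre_); zip as in Python
  (list1.zip list2).foldl (fun distances p => distances ++ [levA p.1.toList p.2.toList]) []

-- ===== PORT B =====
-- one step of B's outer loop: build the next row from `prev` by zipping str1 with prev and prev[1:]
def rowB (str1 : List Char) (prev : List Int) (c2 : Char) : List Int :=
  (str1.zip (prev.zip (prev.drop 1))).foldl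
    (fun cur x =>
      cur ++ [min (x.2.2 + 1)
                (min (PySem.List.pyGetD cur (-1) 0 + 1)
                     (x.2.1 + (if c2 = x.1 then 0 else 1)))])
    [PySem.List.pyGetD prev 0 0 + 1]

def levB (str1 str2 : List Char) : Int :=
  let prev := str2.foldl (rowB str1) (PySem.List.pyRange 0 ((str1.length : Int) + 1) 1)
  PySem.List.pyGetD prev (-1) 0

def custom_levenshtein_distance_pairwise_alt (list1 : List String) (list2 : List String) : List Int :=
  (list1.zip list2).foldl (fun distances p => distances ++ [levB p.1.toList p.2.toList]) []

-- ===== PRECONDITION & SPEC =====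
-- A raises ValueError when the two lists have different lengths; Pre_ excludes exactly that.
def Pre_custom_levenshtein_distance_pairwise (list1 : List String) (list2 : List String) : Prop :=
  list1.length = list2.length
instance (list1 : List String) (list2 : List String) : Decidable (Pre_custom_levenshtein_distance_pairwise list1 list2) := by unfold Pre_custom_levenshtein_distance_pairwise; infer_instance

def pvWitness_custom_levenshtein_distance_pairwise : List String × List String :=
  (["kitten", "a b"], ["sitting", "abc"])

def Spec_custom_levenshtein_distance_pairwise (list1 : List String) (list2 : List String) (out : List Int) : Prop := out = custom_levenshtein_distance_pairwise_alt list1 list2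
instance (list1 : List String) (list2 : List String) (out : List Int) : Decidable (Spec_custom_levenshtein_distance_pairwise list1 list2 out) := by unfold Spec_custom_levenshtein_distance_pairwise; infer_instance

-- ===== CLAIM (what is proved, stated in full; the proofs are below) =====
def Claim_equal_custom_levenshtein_distance_pairwise : Prop := ∀ (list1 : List String) (list2 : List String), Dom_custom_levenshtein_distance_pairwise list1 list2 → Pre_custom_levenshtein_distance_pairwise list1 list2 → Spec_custom_levenshtein_distance_pairwise list1 list2 (custom_levenshtein_distance_pairwise list1 list2)

-- ===== LEMMAS AND PROOFS =====

-- reference Levenshtein on prefix lengths, with exactly the three-way min both programs use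
def L (s t : List Char) : Nat → Nat → Int
  | 0, j => (j : Int)
  | (i+1), 0 => ((i : Int) + 1)
  | (i+1), (j+1) =>
      let cost : Int := if s.getD i ' ' = t.getD j ' ' then 0 else 1
      min (L s t i (j+1) + 1) (min (L s t (i+1) j + 1) (L s t i j + cost))

theorem L_zero_right (s t : List Char) (i : Nat) : L s t i 0 = (i : Int) := by
  cases i <;> simp [L]

theorem L_symm (s t : List Char) (i j : Nat) : L s t i j = L t s j i := by
  fun_induction L s t i j with
  | case1 j => simp [L_zero_right]
  | case2 i => simp [L]
  | case3 i j cost ih1 ih2 ih3 =>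
      simp only [cost]
      simp only [L, ih1, ih2, ih3]
      split_ifs with h1 h2 <;> first | omega | simp_all

-- row k of the reference table, indexed by prefixes of s
def rowRef (t s : List Char) (k : Nat) : List Int :=
  (List.range (s.length+1)).map (fun j => L t s k j)

theorem rowB_inner (t s : List Char) (k : Nat) (hk : k < t.length) :
    ∀ (d j : Nat), j + d = s.length →
    ((s.drop j).zip (((rowRef t s k).drop j).zip ((rowRef t s k).drop (j+1)))).foldl
      (fun cur x => cur ++ [min (x.2.2 + 1)
          (min (PySem.List.pyGetD cur (-1) 0 + 1)
               (x.2.1 + (if t[k] = x.1 then 0 else 1)))])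
      ((List.range (j+1)).map (fun q => L t s (k+1) q))
    = rowRef t s (k+1) := by
  intro d
  induction d with
  | zero =>
      intro j hj
      have hj' : j = s.length := by omega
      subst hj'
      simp [rowRef, List.drop_eq_nil_of_le]
  | succ d ih =>
      intro j hj
      have hjs : j < s.length := by omega
      have hprev : j < (rowRef t s k).length := by simp [rowRef]; omega
      have hprev1 : j + 1 < (rowRef t s k).length := by simp [rowRef]; omega
      rw [List.drop_eq_getElem_cons hjs, List.drop_eq_getElem_cons hprev,
          List.drop_eq_getElem_cons hprev1]
      simp only [List.zip_cons_cons, List.foldl_cons]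
      have hlastacc : PySem.List.pyGetD ((List.range (j+1)).map (fun q => L t s (k+1) q)) (-1) 0
          = L t s (k+1) j := by
        simp [List.range_succ, PySem.List.pyGetD_neg_one_append_singleton]
      have hgj : (rowRef t s k)[j] = L t s k j := by
        simp [rowRef]
      have hgj1 : (rowRef t s k)[j+1] = L t s k (j+1) := by
        simp [rowRef]
      rw [hlastacc, hgj, hgj1]
      have hval : min (L t s k (j+1) + 1)
            (min (L t s (k+1) j + 1) (L t s k j + (if t[k] = s[j] then (0:Int) else 1)))
          = L t s (k+1) (j+1) := by
        simp [L, hk, hjs]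
      rw [hval]
      have hacc : (List.range (j+1)).map (fun q => L t s (k+1) q) ++ [L t s (k+1) (j+1)]
          = (List.range (j+1+1)).map (fun q => L t s (k+1) q) := by
        simp [List.range_succ]
      rw [hacc]
      have h2 := ih (j+1) (by omega)
      rw [List.drop_eq_getElem_cons hprev1, hgj1] at h2
      exact h2
  
theorem rowB_step (t s : List Char) (k : Nat) (hk : k < t.length) :
    rowB s (rowRef t s k) t[k] = rowRef t s (k+1) := by
  have h' := rowB_inner t s k hk s.length 0 (by omega)
  simp only [List.drop_zero] at h'
  unfold rowB
  have hinit : [PySem.List.pyGetD (rowRef t s k) 0 0 + 1]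
      = (List.range (0+1)).map (fun q => L t s (k+1) q) := by
    simp [PySem.List.pyGetD_zero, rowRef, List.range_succ_eq_map, L_zero_right]
  rw [← hinit] at h'
  exact h'

theorem levB_outer (t s : List Char) :
    ∀ (d k : Nat), k + d = t.length →
    (t.drop k).foldl (rowB s) (rowRef t s k) = rowRef t s t.length := by
  intro d
  induction d with
  | zero =>
      intro k hk
      have hkt : k = t.length := by omega
      subst hkt
      simp [List.drop_eq_nil_of_le]
  | succ d ih =>
      intro k hk
      have hkt : k < t.length := by omega
      rw [List.drop_eq_getElem_cons hkt, List.foldl_cons, rowB_step t s k hkt]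
      exact ih (k+1) (by omega)

-- B's final value is the reference distance of the swapped pair
theorem levB_eq (s t : List Char) : levB s t = L t s t.length s.length := by
  unfold levB
  have h0 : PySem.List.pyRange 0 ((s.length:Int)+1) 1 = rowRef t s 0 := by
    have hn : (((s.length:Int)+1) - 0).toNat = s.length + 1 := by omega
    rw [PySem.List.pyRange_one, hn]
    simp [rowRef, L]
  have hout := levB_outer t s t.length 0 (by omega)
  simp only [List.drop_zero] at hout
  rw [h0, hout]
  simp [rowRef, List.range_succ, PySem.List.pyGetD_neg_one_append_singleton]

theorem set_append_length {α : Type} (xs : List α) (v y : α) (ys : List α) :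
    (xs ++ y :: ys).set xs.length v = xs ++ v :: ys := by
  induction xs with
  | nil => rfl
  | cons a xs ih => simp [ih]

theorem getD_append_length {α : Type} (xs : List α) (y : α) (ys : List α) (d : α) :
    (xs ++ y :: ys).getD xs.length d = y := by
  induction xs with
  | nil => rfl
  | cons a xs ih => simpa using ih

theorem getD_append_lt {α : Type} (xs ys : List α) (n : Nat) (d : α) (h : n < xs.length) :
    (xs ++ ys).getD n d = xs.getD n d := by
  simp [List.getD, List.getElem?_append_left h]

theorem rowRef_getD (t s : List Char) (k j : Nat) (h : j < s.length + 1) :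
    (rowRef t s k).getD j 0 = L t s k j := by
  rw [List.getD_eq_getElem _ _ (by simp [rowRef]; omega)]
  simp [rowRef]

theorem pyRange_succ_natCast (K : Nat) :
    PySem.List.pyRange 0 ((K:Int)+1) 1 = (List.range (K+1)).map (fun k : Nat => (k:Int)) := by
  have hn : (((K:Int)+1) - 0).toNat = K + 1 := by omega
  rw [PySem.List.pyRange_one, hn]
  refine List.map_congr_left (fun a _ => ?_)
  simp

theorem L_succ_succ (s t : List Char) (k jj : Nat) (hk : k < s.length) (hj : jj < t.length) :
    L s t (k+1) (jj+1)
      = min (L s t k (jj+1) + 1)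
          (min (L s t (k+1) jj + 1) (L s t k jj + (if s[k] = t[jj] then (0:Int) else 1))) := by
  simp [L, hk, hj]

theorem pyGetD_append_len (A : List (List Int)) (r : List Int) (T : List (List Int))
    (i : Int) (hi : i = (A.length : Int)) :
    PySem.List.pyGetD (A ++ r :: T) i [] = r := by
  subst hi
  rw [PySem.List.pyGetD_natCast]
  exact getD_append_length A r T []

theorem set_append_len' {α : Type} (A : List α) (r v : α) (T : List α) (k : Nat)
    (hk : k = A.length) : (A ++ r :: T).set k v = A ++ v :: T := by
  subst hk
  exact set_append_length A v r T

-- stage 0: the zero matrix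
theorem A_dp0 (m n : Nat) :
    (PySem.List.pyRange 0 ((m:Int)+1) 1).map
        (fun _ => (PySem.List.pyRange 0 ((n:Int)+1) 1).map (fun _ => (0:Int)))
      = List.replicate (m+1) (List.replicate (n+1) (0:Int)) := by
  rw [pyRange_succ_natCast, pyRange_succ_natCast]
  simp [Function.comp_def, List.map_const']

-- stage 1: first column initialised
theorem A_dp1 (m n : Nat) : ∀ K, K ≤ m+1 →
    ((List.range K).map (fun k : Nat => (k:Int))).foldl stepInit1
        (List.replicate (m+1) (List.replicate (n+1) (0:Int)))
      = (List.range K).map (fun i : Nat => ((i:Int)) :: List.replicate n 0)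
        ++ List.replicate (m+1-K) (List.replicate (n+1) (0:Int)) := by
  intro K
  induction K with
  | zero => simp
  | succ K ih =>
      intro hK
      rw [List.range_succ, List.map_append, List.foldl_append, ih (by omega)]
      simp only [List.map_cons, List.map_nil, List.foldl_cons, List.foldl_nil]
      unfold stepInit1
      have hrep : List.replicate (m+1-K) (List.replicate (n+1) (0:Int))
          = List.replicate (n+1) (0:Int) :: List.replicate (m-K) (List.replicate (n+1) (0:Int)) := by
        rw [← List.replicate_succ]
        congr 1
        omega
      rw [hrep, pyGetD_append_len _ _ _ _ (by simp)]
      have hz : (List.replicate (n+1) (0:Int)).set 0 ((K:Int)) = ((K:Int)) :: List.replicate n 0 := by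
        simp [List.replicate_succ]
      rw [hz, show ((K:Int)).toNat = K from by simp,
          set_append_len' _ _ _ _ _ (by simp)]
      have hmk : m+1-(K+1) = m-K := by omega
      simp [hmk]

-- stage 2: first row initialised (head of the matrix)
theorem A_dp2 (n : Nat) (T : List (List Int)) : ∀ K, K ≤ n+1 →
    ((List.range K).map (fun k : Nat => (k:Int))).foldl stepInit2
        (List.replicate (n+1) (0:Int) :: T)
      = ((List.range K).map (fun k : Nat => (k:Int)) ++ List.replicate (n+1-K) (0:Int)) :: T := by
  intro K
  induction K with
  | zero => simp
  | succ K ih =>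
      intro hK
      rw [List.range_succ, List.map_append, List.foldl_append, ih (by omega)]
      simp only [List.map_cons, List.map_nil, List.foldl_cons, List.foldl_nil]
      unfold stepInit2
      have hrep : List.replicate (n+1-K) (0:Int) = (0:Int) :: List.replicate (n-K) (0:Int) := by
        rw [← List.replicate_succ]
        congr 1
        omega
      rw [hrep, PySem.List.pyGetD_zero_cons,
          show ((K:Int)).toNat = K from by simp,
          set_append_len' _ _ _ _ _ (by simp)]
      have hnk : n+1-(K+1) = n-K := by omega
      simp [List.range_succ, hnk]

-- the partially filled row i = k+1 after the first J inner iterations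
def partRow (s t : List Char) (k J : Nat) : List Int :=
  (List.range (J+1)).map (fun j => L s t (k+1) j) ++ List.replicate (t.length - J) 0

-- stage 3, inner loop
theorem A_inner (s t : List Char) (k : Nat) (hk : k < s.length)
    (P T : List (List Int)) (hP : P = (List.range (k+1)).map (fun i => rowRef s t i)) :
    ∀ J, J ≤ t.length →
    (PySem.List.pyRange 1 ((J:Int)+1) 1).foldl (stepFill s t ((k:Int)+1))
        (P ++ (((k:Int)+1) :: List.replicate t.length 0) :: T)
      = P ++ partRow s t k J :: T := by
  intro J
  induction J with
  | zero =>
      intro _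
      rw [show ((0:Nat):Int)+1 = 1 from by norm_num, PySem.List.pyRange_one_eq_nil (by omega)]
      simp only [List.foldl_nil]
      have h0 : ((k:Int)+1) :: List.replicate t.length 0 = partRow s t k 0 := by
        simp [partRow, L_zero_right]
      rw [h0]
  | succ J ih =>
      intro hJ
      have hJn : J < t.length := by omega
      have hcast : ((J+1 : Nat):Int) + 1 = ((J:Int)+1) + 1 := by push_cast; ring
      rw [hcast, PySem.List.pyRange_one_succ_right (by omega), List.foldl_append,
          List.foldl_cons, List.foldl_nil, ih (by omega)]
      simp only [stepFill]
      -- indices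
      have hi1 : ((k:Int)+1-1) = (k:Int) := by ring
      have hj1 : ((J:Int)+1-1) = (J:Int) := by ring
      have hPlen : ((k:Int)+1) = ((P.length:Nat):Int) := by simp [hP]
      -- matrix reads
      have hread_prev : PySem.List.pyGetD (P ++ partRow s t k J :: T) ((k:Int)+1-1) []
          = rowRef s t k := by
        rw [hi1, PySem.List.pyGetD_natCast, getD_append_lt _ _ _ _ (by simp [hP])]
        subst hP
        rw [List.getD_eq_getElem _ _ (by simp)]
        simp
      have hread_cur : PySem.List.pyGetD (P ++ partRow s t k J :: T) ((k:Int)+1) []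
          = partRow s t k J := pyGetD_append_len _ _ _ _ hPlen
      -- row reads
      have hrow_prev_j : PySem.List.pyGetD (rowRef s t k) ((J:Int)+1) 0 = L s t k (J+1) := by
        rw [show ((J:Int)+1) = ((J+1 : Nat):Int) from by push_cast; ring,
            PySem.List.pyGetD_natCast]
        exact rowRef_getD s t k (J+1) (by omega)
      have hrow_prev_j1 : PySem.List.pyGetD (rowRef s t k) ((J:Int)+1-1) 0 = L s t k J := by
        rw [hj1, PySem.List.pyGetD_natCast]
        exact rowRef_getD s t k J (by omega)
      have hrow_cur_j1 : PySem.List.pyGetD (partRow s t k J) ((J:Int)+1-1) 0 = L s t (k+1) J := by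
        rw [hj1, PySem.List.pyGetD_natCast, partRow,
            getD_append_lt _ _ _ _ (by simp),
            List.getD_eq_getElem _ _ (by simp)]
        simp
      -- cost
      have hcost : (if PySem.List.pyGet? s ((k:Int)+1-1) = PySem.List.pyGet? t ((J:Int)+1-1)
            then (0:Int) else 1) = (if s[k] = t[J] then (0:Int) else 1) := by
        rw [hi1, hj1, PySem.List.pyGet?_natCast, PySem.List.pyGet?_natCast,
            List.getElem?_eq_getElem hk, List.getElem?_eq_getElem hJn]
        simp
      rw [hread_prev, hread_cur, hrow_prev_j, hrow_prev_j1, hrow_cur_j1, hcost]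
      -- the written value is L s t (k+1) (J+1)
      rw [← L_succ_succ s t k J hk hJn]
      -- sets
      have htn : (((J:Int)+1)).toNat = J + 1 := by omega
      have hset_row : (partRow s t k J).set (J+1) (L s t (k+1) (J+1)) = partRow s t k (J+1) := by
        unfold partRow
        have hrep : List.replicate (t.length - J) (0:Int)
            = (0:Int) :: List.replicate (t.length - (J+1)) 0 := by
          rw [← List.replicate_succ]
          congr 1
          omega
        rw [hrep, set_append_len' _ _ _ _ _ (by simp)]
        simp [List.range_succ]
      have hktn : (((k:Int)+1)).toNat = P.length := by simp [hP]
      rw [htn, hset_row, hktn, set_append_len' _ _ _ _ _ rfl]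

-- stage 3, outer loop
theorem A_outer (s t : List Char) : ∀ K, K ≤ s.length →
    (PySem.List.pyRange 1 ((K:Int)+1) 1).foldl (fillRow s t (t.length:Int))
        (rowRef s t 0 :: (List.range s.length).map
            (fun r : Nat => ((r:Int)+1) :: List.replicate t.length 0))
      = (List.range (K+1)).map (fun i => rowRef s t i)
        ++ (List.range (s.length - K)).map
            (fun r : Nat => ((K:Int)+1+(r:Int)) :: List.replicate t.length 0) := by
  intro K
  induction K with
  | zero =>
      intro _
      rw [show ((0:Nat):Int)+1 = 1 from by norm_num, PySem.List.pyRange_one_eq_nil (by omega)]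
      simp only [List.foldl_nil, List.range_one, List.map_cons, List.map_nil,
        List.singleton_append, Nat.sub_zero, Nat.cast_zero]
      congr 1
      exact List.map_congr_left (fun r _ => by norm_num [add_comm])
  | succ K ih =>
      intro hK
      have hKs : K < s.length := by omega
      have hcast : ((K+1 : Nat):Int) + 1 = ((K:Int)+1) + 1 := by push_cast; ring
      rw [hcast, PySem.List.pyRange_one_succ_right (by omega), List.foldl_append,
          List.foldl_cons, List.foldl_nil, ih (by omega)]
      -- split off the first untouched row
      have hsplit : (List.range (s.length - K)).map
            (fun r : Nat => ((K:Int)+1+(r:Int)) :: List.replicate t.length 0)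
          = (((K:Int)+1) :: List.replicate t.length 0)
            :: (List.range (s.length - (K+1))).map
                (fun r : Nat => (((K+1:Nat):Int)+1+(r:Int)) :: List.replicate t.length 0) := by
        have h1 : s.length - K = (s.length - (K+1)) + 1 := by omega
        rw [h1, List.range_succ_eq_map, List.map_cons, List.map_map]
        congr 1
        refine List.map_congr_left (fun a _ => ?_)
        simp only [Function.comp_apply]
        push_cast
        ring_nf
      rw [hsplit]
      unfold fillRow
      rw [A_inner s t K hKs _ _ rfl t.length le_rfl]
      have hpart : partRow s t K t.length = rowRef s t (K+1) := by
        simp [partRow, rowRef]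
      rw [hpart]
      simp [List.range_succ]
  
-- A's final value is the reference distance
theorem levA_eq (s t : List Char) : levA s t = L s t s.length t.length := by
  simp only [levA]
  rw [A_dp0 s.length t.length, pyRange_succ_natCast s.length,
      A_dp1 s.length t.length (s.length+1) le_rfl]
  simp only [Nat.sub_self, List.replicate_zero, List.append_nil]
  have hdp1 : (List.range (s.length+1)).map (fun i : Nat => ((i:Int)) :: List.replicate t.length 0)
      = List.replicate (t.length+1) (0:Int)
        :: (List.range s.length).map (fun r : Nat => ((r:Int)+1) :: List.replicate t.length 0) := by
    rw [List.range_succ_eq_map, List.map_cons, List.map_map]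
    congr 1
  rw [hdp1, pyRange_succ_natCast t.length, A_dp2 t.length _ (t.length+1) le_rfl]
  simp only [Nat.sub_self, List.replicate_zero, List.append_nil]
  have hrow0 : (List.range (t.length+1)).map (fun k : Nat => (k:Int)) = rowRef s t 0 := by
    simp [rowRef, L]
  rw [hrow0, A_outer s t s.length le_rfl]
  simp only [Nat.sub_self, List.range_zero, List.map_nil, List.append_nil]
  have hfinal : PySem.List.pyGetD
      ((List.range (s.length+1)).map (fun i => rowRef s t i)) ((s.length : Nat) : Int) []
      = rowRef s t s.length := by
    rw [PySem.List.pyGetD_natCast, List.getD_eq_getElem _ _ (by simp)]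
    simp
  rw [hfinal, PySem.List.pyGetD_natCast]
  exact rowRef_getD s t s.length t.length (by omega)

theorem levA_eq_levB (s t : List Char) : levA s t = levB s t := by
  rw [levA_eq, levB_eq, L_symm]

-- ===== VERDICT (by name: the statement is the Claim_ definition above) =====
theorem custom_levenshtein_distance_pairwise_spec : Claim_equal_custom_levenshtein_distance_pairwise := by
  intro list1 list2 _ _
  unfold Spec_custom_levenshtein_distance_pairwise
  unfold custom_levenshtein_distance_pairwise custom_levenshtein_distance_pairwise_alt
  induction (list1.zip list2) using List.reverseRecOn with
  | nil => rfl
  | append_singleton xs x ih =>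
      simp only [List.foldl_append, List.foldl_cons, List.foldl_nil, levA_eq_levB]
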